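-- pv_equiv track=rewrite | github.com/mishavetl/lit-2015-answers | ex7.py | biggest_n
-- ===== SOURCE A (Python) =====
-- def biggest_n(l):
--     amount = 0
--     max_elem = l[0]
--
--     for elem in l[1:]:
--         if elem > max_elem:
--             amount += max_elem
--             max_elem = elem
--
--         else:
--             amount += elem
--
--     return amount
-- ===== SOURCE B (Python) =====
-- def biggest_n(l):
--     return sum(l[1:], l[0]) - max(l)
-- ===== Notes on version B (the rewrite author's own statement) =====
-- stated objective: simpler
-- what changed: Replaces the running-max accumulator loop with the closed form: total of the list minus its maximum, using sum(l[1:], l[0]) and max(l).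
import Mathlib
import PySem

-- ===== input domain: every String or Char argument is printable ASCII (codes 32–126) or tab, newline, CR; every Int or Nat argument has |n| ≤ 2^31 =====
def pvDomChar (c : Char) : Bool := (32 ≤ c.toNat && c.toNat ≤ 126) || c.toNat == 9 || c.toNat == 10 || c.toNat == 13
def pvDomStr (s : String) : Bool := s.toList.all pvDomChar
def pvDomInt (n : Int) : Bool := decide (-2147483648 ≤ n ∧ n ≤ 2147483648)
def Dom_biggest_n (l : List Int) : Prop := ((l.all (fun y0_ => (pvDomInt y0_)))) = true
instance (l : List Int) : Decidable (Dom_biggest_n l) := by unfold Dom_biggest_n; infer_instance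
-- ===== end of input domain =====

-- B replaces A's running-max loop by the closed form sum-minus-max (simpler; equivalence of return values proved below).

-- ===== PORT A =====
-- amount = 0; max_elem = l[0]; for elem in l[1:]: …
def biggest_n (l : List Int) : Int :=
  match PySem.List.pyGet? l 0 with
  | none => 0   -- unreachable: Pre_ excludes the empty list (IndexError)
  | some m0 =>
    ((PySem.List.slice l (some 1) none).foldl
      (fun (st : Int × Int) elem =>
        if elem > st.2 then (st.1 + st.2, elem) else (st.1 + elem, st.2))
      (0, m0)).1

-- ===== PORT B =====
-- sum(l[1:], l[0]) - max(l)
def biggest_n_alt (l : List Int) : Int :=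
  match PySem.List.pyGet? l 0, PySem.List.max? l (fun y => y) with
  | some h, some m => (PySem.List.slice l (some 1) none).foldl (· + ·) h - m
  | _, _ => 0   -- unreachable: Pre_ excludes the empty list (IndexError at l[0])

-- ===== PRECONDITION & SPEC =====
-- Pre_ excludes exactly the empty list, on which Python A raises IndexError at l[0].
def Pre_biggest_n (l : List Int) : Prop := l ≠ []
instance (l : List Int) : Decidable (Pre_biggest_n l) := by unfold Pre_biggest_n; infer_instance
def pvWitness_biggest_n : List Int := ([3, 1, 4])
def Spec_biggest_n (l : List Int) (out : Int) : Prop := out = biggest_n_alt l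
instance (l : List Int) (out : Int) : Decidable (Spec_biggest_n l out) := by unfold Spec_biggest_n; infer_instance

-- ===== CLAIM (what is proved, stated in full; the proofs are below) =====
def Claim_equal_biggest_n : Prop := ∀ (l : List Int), Dom_biggest_n l → Pre_biggest_n l → Spec_biggest_n l (biggest_n l)

-- ===== LEMMAS AND PROOFS =====

-- Python's sum(xs, x) as a fold equals x + sum xs.
theorem foldl_add_sum (xs : List Int) (x : Int) : xs.foldl (· + ·) x = x + xs.sum := by
  induction xs generalizing x with
  | nil => simp
  | cons y ys ih => simp [List.sum_cons, ih]; ring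

-- The loop state (amount, max_elem) after folding xs from (a, m):
-- amount = a + m + sum xs - running max, max_elem = running max.
theorem biggest_n_loop_inv (xs : List Int) (a m : Int) :
    xs.foldl
      (fun (st : Int × Int) elem =>
        if elem > st.2 then (st.1 + st.2, elem) else (st.1 + elem, st.2))
      (a, m)
    = (a + m + xs.sum - xs.foldl max m, xs.foldl max m) := by
  induction xs generalizing a m with
  | nil => simp
  | cons e xs ih =>
    simp only [List.foldl_cons, List.sum_cons]
    by_cases h : e > m
    · rw [if_pos h, ih, max_eq_right (le_of_lt h)]
      congr 1; ring
    · rw [if_neg h, ih, max_eq_left (by omega)]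
      congr 1; ring

theorem biggest_n_spec : Claim_equal_biggest_n := by
  intro l _ hpre
  unfold Spec_biggest_n biggest_n biggest_n_alt
  obtain ⟨x, xs, rfl⟩ := List.exists_cons_of_ne_nil hpre
  rw [PySem.List.max?_id_cons, PySem.List.slice_from_one]
  simp only [PySem.List.pyGet?, PySem.List.pyIdx?]
  simp only [List.tail_cons, biggest_n_loop_inv]
  have hsum : xs.foldl (· + ·) x = x + xs.sum := foldl_add_sum xs x
  simp_all
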